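-- pv_equiv track=rewrite | github.com/lifecycles1/competitive-programming | codesignal/arcade/2.core/11.spring of integration/7.beautifulText.py | beautifulText
-- ===== SOURCE A (Python) =====
-- def beautifulText(inputString, l, r):
--     for w in range(l, r+1):
--         i = w
--         while i < len(inputString):
--             if inputString[i] != ' ':
--                 break
--             i += w+1
--         if i == len(inputString):
--             return True
--     return False
-- ===== SOURCE B (Python) =====
-- def beautifulText(inputString, l, r):
--     # Stage 1: the beautiful widths of this text, independent of [l, r] —
--     # w is beautiful iff w+1 divides n+1 and all the stride positions are blanks,
--     # so it suffices to enumerate the divisors d = w+1 of n+1.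
--     n = len(inputString)
--     valid = [d - 1 for d in range(1, n + 2)
--              if (n + 1) % d == 0 and all(inputString[k] == ' ' for k in range(d - 1, n, d))]
--     # Stage 2: is any beautiful width inside the requested range?
--     return any(l <= w <= r for w in valid)
-- ===== Notes on version B (the rewrite author's own statement) =====
-- stated objective: alternative
-- what changed: A steps a per-width while-loop over every requested width in range(l, r+1); B inverts the search: it first computes the text's beautiful widths by enumerating the divisors d of n+1 (a width w is beautiful iff w+1 divides n+1 and the stride positions are blanks), independent of [l, r], and then just range-checks that list.
-- outside the precondition, e.g. on beautifulText('ab', -2, -2): A returns False, B returns False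
import Mathlib
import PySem

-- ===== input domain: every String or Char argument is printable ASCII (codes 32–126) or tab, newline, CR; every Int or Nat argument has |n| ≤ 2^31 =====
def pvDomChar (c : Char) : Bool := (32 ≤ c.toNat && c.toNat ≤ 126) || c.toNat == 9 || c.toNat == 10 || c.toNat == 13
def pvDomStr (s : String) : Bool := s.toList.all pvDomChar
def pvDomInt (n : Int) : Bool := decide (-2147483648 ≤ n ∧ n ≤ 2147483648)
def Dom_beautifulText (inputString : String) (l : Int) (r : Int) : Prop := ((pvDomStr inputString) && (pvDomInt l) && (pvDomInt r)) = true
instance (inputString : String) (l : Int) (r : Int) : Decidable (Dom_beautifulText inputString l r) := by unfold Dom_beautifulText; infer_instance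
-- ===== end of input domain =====

-- B inverts the search: instead of A's per-width stepping loop over [l, r], it first lists the
-- text's beautiful widths by enumerating the divisors of n+1, then range-checks them
-- (objective: alternative); return values agree on Pre_.

-- ===== PORT A =====
-- inner 'while i < len(inputString): if inputString[i] != " ": break; i += w+1'.
-- The fuel bounds the number of iterations; inside Pre_ (w ≥ 0) the step w+1 ≥ 1, so
-- s.length + 1 steps always suffice and the fuel is never exhausted.
def pvALoop (fuel : Nat) (s : List Char) (w : Int) (i : Int) : Int :=
  match fuel with
  | 0 => i
  | fuel + 1 =>
    if i < (s.length : Int) then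
      match PySem.List.pyGet? s i with
      | some c => if c ≠ ' ' then i else pvALoop fuel s w (i + (w + 1))
      | none => i          -- IndexError in Python; unreachable inside Pre_
    else i

-- 'for w in range(l, r+1): … if i == len(inputString): return True' / final 'return False'
def pvAFor (s : List Char) : List Int → Bool
  | [] => false
  | w :: ws =>
    if pvALoop (s.length + 1) s w w == (s.length : Int) then true else pvAFor s ws

def beautifulText (inputString : String) (l : Int) (r : Int) : Bool :=
  pvAFor inputString.toList (PySem.List.pyRange l (r + 1) 1)

-- ===== PORT B =====
-- the comprehension's condition on a divisor candidate d:
-- '(n + 1) % d == 0 and all(inputString[k] == " " for k in range(d - 1, n, d))'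
def pvDivOk (cs : List Char) (n d : Int) : Bool :=
  (PySem.Int.mod (n + 1) d == 0) &&
    (PySem.List.pyRange (d - 1) n d).all (fun k => PySem.List.pyGet? cs k == some ' ')

-- 'valid = [d - 1 for d in range(1, n + 2) if …]'
def pvValidWidths (cs : List Char) (n : Int) : List Int :=
  ((PySem.List.pyRange 1 (n + 2) 1).filter (pvDivOk cs n)).map (fun d => d - 1)

-- 'return any(l <= w <= r for w in valid)'
def beautifulText_alt (inputString : String) (l : Int) (r : Int) : Bool :=
  (pvValidWidths inputString.toList (inputString.toList.length : Int)).any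
    (fun w => decide (l ≤ w) && decide (w ≤ r))

-- ===== PRECONDITION & SPEC =====
-- Pre_ excludes negative column widths in range(l, r+1): there A indexes from the end of the
-- string, loops forever (w = -1 on a trailing space) or raises IndexError, while B never
-- considers a negative width — an accidental corner no caller of a width check would specify.
def Pre_beautifulText (inputString : String) (l : Int) (r : Int) : Prop :=
  r < l ∨ 0 ≤ l
instance (inputString : String) (l : Int) (r : Int) : Decidable (Pre_beautifulText inputString l r) := by unfold Pre_beautifulText; infer_instance

def pvWitness_beautifulText : String × Int × Int := ("ab c", 1, 3)

def Spec_beautifulText (inputString : String) (l : Int) (r : Int) (out : Bool) : Prop := out = beautifulText_alt inputString l r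
instance (inputString : String) (l : Int) (r : Int) (out : Bool) : Decidable (Spec_beautifulText inputString l r out) := by unfold Spec_beautifulText; infer_instance

-- ===== CLAIM (what is proved, stated in full; the proofs are below) =====
def Claim_equal_beautifulText : Prop := ∀ (inputString : String) (l : Int) (r : Int), Dom_beautifulText inputString l r → Pre_beautifulText inputString l r → Spec_beautifulText inputString l r (beautifulText inputString l r)

-- ===== LEMMAS AND PROOFS =====

-- past the string end the loop index can only equal n if it is aligned (it overshoots by < w+1)
lemma pv_terminal {w i n : Int} (_hw : 0 ≤ w) (hle : n ≤ i) (hub : i < n + (w + 1)) :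
    i = n ↔ (w + 1) ∣ (n - i) := by
  constructor
  · intro h; simp [h]
  · intro hd
    have h0 : n - i = 0 := Int.eq_zero_of_abs_lt_dvd hd (by rw [abs_lt]; omega)
    omega

-- Characterisation of A's inner loop: starting at i (i ≡ w mod w+1 at the call site), it lands
-- exactly on n = s.length iff n - i is a multiple of w+1 and every visited position is a space.
lemma pvALoop_char (fuel : Nat) (s : List Char) (w : Int) :
    ∀ i : Int, 0 ≤ w → 0 ≤ i → i < (s.length : Int) + (w + 1) →
      (s.length : Int) < i + (w + 1) * fuel →
      (pvALoop fuel s w i = (s.length : Int) ↔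
        ((w + 1) ∣ ((s.length : Int) - i) ∧
          ∀ k : Int, i ≤ k → k < (s.length : Int) → (w + 1) ∣ (k - i) →
            PySem.List.pyGet? s k = some ' ')) := by
  induction fuel with
  | zero =>
    intro i hw hi hub hfuel
    simp only [pvALoop]
    rw [pv_terminal hw (by omega) hub]
    exact ⟨fun h => ⟨h, fun k hk1 hk2 _ => by omega⟩, fun h => h.1⟩
  | succ fuel ih =>
    intro i hw hi hub hfuel
    by_cases hlt : i < (s.length : Int)
    · have hnat : i < ((s.length : Nat) : Int) := by exact_mod_cast hlt
      have hget : PySem.List.pyGet? s i = some (s[i.toNat]'(by omega)) :=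
        PySem.List.pyGet?_eq_some_getElem s hi hnat
      simp only [pvALoop, if_pos hlt, hget]
      by_cases hc : s[i.toNat]'(by omega) = ' '
      · simp only [hc, ne_eq, not_true_eq_false, if_false]
        rw [ih (i + (w + 1)) hw (by omega) (by omega)
          (by push_cast at hfuel ⊢; linarith)]
        constructor
        · rintro ⟨hdvd, hall⟩
          refine ⟨by rcases hdvd with ⟨c, hc'⟩; exact ⟨c + 1, by linarith⟩, ?_⟩
          intro k hk1 hk2 hk3
          rcases eq_or_lt_of_le hk1 with heq | hlt'
          · subst heq; rw [hget]; simp [hc]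
          · have hge : i + (w + 1) ≤ k := by
              have h2 : (w + 1) ≤ k - i := Int.le_of_dvd (by omega) hk3
              omega
            exact hall k hge hk2 (by rcases hk3 with ⟨c, hc'⟩; exact ⟨c - 1, by linarith⟩)
        · rintro ⟨hdvd, hall⟩
          refine ⟨by rcases hdvd with ⟨c, hc'⟩; exact ⟨c - 1, by linarith⟩, ?_⟩
          intro k hk1 hk2 hk3
          exact hall k (by omega) hk2 (by rcases hk3 with ⟨c, hc'⟩; exact ⟨c + 1, by linarith⟩)
      · simp only [ne_eq, hc, not_false_eq_true, if_true]
        constructor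
        · intro h; omega
        · rintro ⟨-, hall⟩
          have := hall i le_rfl hlt ⟨0, by ring⟩
          rw [hget] at this
          exact absurd (Option.some_injective _ this) hc
    · simp only [pvALoop, if_neg hlt]
      rw [pv_terminal hw (by omega) hub]
      exact ⟨fun h => ⟨h, fun k hk1 hk2 _ => by omega⟩, fun h => h.1⟩

-- per-width agreement: A's stepping test succeeds at w ≥ 0 iff B's divisor condition holds at d = w+1.
lemma pv_perW (s : List Char) (w : Int) (hw : 0 ≤ w) :
    (pvALoop (s.length + 1) s w w == (s.length : Int)) = pvDivOk s (s.length : Int) (w + 1) := by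
  rw [Bool.eq_iff_iff]
  have hstep : (0:Int) < w + 1 := by omega
  have hfuel : (s.length : Int) < w + (w + 1) * ((s.length + 1 : Nat) : Int) := by
    push_cast; nlinarith
  rw [beq_iff_eq, pvALoop_char (s.length + 1) s w w hw hw (by omega) hfuel]
  unfold pvDivOk
  rw [Bool.and_eq_true, beq_iff_eq, PySem.Int.mod_eq_zero_iff_dvd, List.all_eq_true]
  have hiff : (w + 1) ∣ ((s.length : Int) - w) ↔ (w + 1) ∣ ((s.length : Int) + 1) := by
    constructor
    · rintro ⟨c, hc⟩; exact ⟨c + 1, by linarith⟩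
    · rintro ⟨c, hc⟩; exact ⟨c - 1, by linarith⟩
  have hsimp : w + 1 - 1 = w := by ring
  constructor
  · rintro ⟨hdvd, hall⟩
    refine ⟨hiff.mp hdvd, ?_⟩
    intro k hk
    rw [hsimp, PySem.List.mem_pyRange_iff_of_pos hstep] at hk
    simp only [beq_iff_eq]
    exact hall k hk.1 hk.2.1 hk.2.2
  · rintro ⟨hdvd, hall⟩
    refine ⟨hiff.mpr hdvd, ?_⟩
    intro k hk1 hk2 hk3
    have := hall k (by
      rw [hsimp, PySem.List.mem_pyRange_iff_of_pos hstep]; exact ⟨hk1, hk2, hk3⟩)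
    simpa using this

-- the early-return for-loop over a width list is List.any of the divisor test at d = w+1.
lemma pv_outer (s : List Char) : ∀ ws : List Int, (∀ w ∈ ws, 0 ≤ w) →
    pvAFor s ws = ws.any (fun w => pvDivOk s (s.length : Int) (w + 1)) := by
  intro ws
  induction ws with
  | nil => intro _; simp [pvAFor]
  | cons w ws ih =>
    intro hall
    have hw : 0 ≤ w := hall w (List.mem_cons_self)
    simp only [pvAFor, List.any_cons]
    rw [pv_perW s w hw, ih (fun x hx => hall x (List.mem_cons_of_mem _ hx))]
    by_cases h : pvDivOk s (s.length : Int) (w + 1) = true <;> simp [h]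

-- a successful divisor test forces 1 ≤ d ∣ n+1, hence d ≤ n+1
lemma pv_div_bound {cs : List Char} {n d : Int} (hn : 0 ≤ n) (hd : 0 < d)
    (h : pvDivOk cs n d = true) : d ≤ n + 1 := by
  unfold pvDivOk at h
  rw [Bool.and_eq_true, beq_iff_eq, PySem.Int.mod_eq_zero_iff_dvd] at h
  exact Int.le_of_dvd (by omega) h.1

-- ===== VERDICT (by name: the statement is the Claim_ definition above) =====
theorem beautifulText_spec : Claim_equal_beautifulText := by
  intro inputString l r _hdom hpre
  unfold Spec_beautifulText beautifulText beautifulText_alt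
  set s := inputString.toList with hs
  set n : Int := (s.length : Int) with hn
  rcases hpre with hrl | hl
  · -- empty range: A's for-loop runs zero times; B's range check fails on every valid width
    rw [PySem.List.pyRange_one_eq_nil (by omega : r + 1 ≤ l)]
    simp only [pvAFor]
    symm
    rw [List.any_eq_false]
    intro w _
    simp only [Bool.and_eq_true, decide_eq_true_eq, not_and]
    omega
  · rw [pv_outer s (PySem.List.pyRange l (r + 1) 1)
      (fun w hw => by have := (PySem.List.mem_pyRange_one).mp hw; omega)]
    rw [Bool.eq_iff_iff, List.any_eq_true, List.any_eq_true]
    constructor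
    · rintro ⟨w, hw, hok⟩
      have hwm := (PySem.List.mem_pyRange_one).mp hw
      refine ⟨w, ?_, ?_⟩
      · unfold pvValidWidths
        rw [List.mem_map]
        refine ⟨w + 1, List.mem_filter.mpr ⟨?_, hok⟩, by ring⟩
        rw [PySem.List.mem_pyRange_one]
        have hle := pv_div_bound (cs := s) (by omega) (by omega) hok
        omega
      · simp only [Bool.and_eq_true, decide_eq_true_eq]
        omega
    · rintro ⟨w, hw, hlr⟩
      unfold pvValidWidths at hw
      rw [List.mem_map] at hw
      obtain ⟨d, hd, hdw⟩ := hw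
      rw [List.mem_filter] at hd
      obtain ⟨hdm, hok⟩ := hd
      simp only [Bool.and_eq_true, decide_eq_true_eq] at hlr
      have hwd : w + 1 = d := by omega
      refine ⟨w, ?_, by rw [hwd]; exact hok⟩
      rw [PySem.List.mem_pyRange_one]
      omega
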